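-- pv_equiv track=rewrite | github.com/sherstpasha/AzbukaBoard | create_ranking_tables.py | extract_dataset_and_model
-- ===== SOURCE A (Python) =====
-- def extract_dataset_and_model(filename, datasets):
--     name = filename.replace('.csv', '')
--     matched_dataset = None
--     matched_length = 0
--
--     for dataset_name in datasets.keys():
--         if name.startswith(dataset_name + '_'):
--             if len(dataset_name) > matched_length:
--                 matched_dataset = dataset_name
--                 matched_length = len(dataset_name)
--
--     if matched_dataset:
--         model_name = name[len(matched_dataset) + 1:]
--         return matched_dataset, model_name
--     return None, None
-- ===== SOURCE B (Python) =====
-- def extract_dataset_and_model(filename, datasets):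
--     name = filename.replace('.csv', '')
--     for i in range(len(name) - 1, 0, -1):
--         if name[i] == '_' and name[:i] in datasets:
--             return name[:i], name[i + 1:]
--     return None, None
-- ===== Notes on version B (the rewrite author's own statement) =====
-- stated objective: alternative
-- what changed: B iterates over the underscore positions of the cleaned filename from right to left and returns at the first (hence longest) prefix that is a dict key, instead of A's loop over all dataset keys with a running best-match accumulator.
import Mathlib
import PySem

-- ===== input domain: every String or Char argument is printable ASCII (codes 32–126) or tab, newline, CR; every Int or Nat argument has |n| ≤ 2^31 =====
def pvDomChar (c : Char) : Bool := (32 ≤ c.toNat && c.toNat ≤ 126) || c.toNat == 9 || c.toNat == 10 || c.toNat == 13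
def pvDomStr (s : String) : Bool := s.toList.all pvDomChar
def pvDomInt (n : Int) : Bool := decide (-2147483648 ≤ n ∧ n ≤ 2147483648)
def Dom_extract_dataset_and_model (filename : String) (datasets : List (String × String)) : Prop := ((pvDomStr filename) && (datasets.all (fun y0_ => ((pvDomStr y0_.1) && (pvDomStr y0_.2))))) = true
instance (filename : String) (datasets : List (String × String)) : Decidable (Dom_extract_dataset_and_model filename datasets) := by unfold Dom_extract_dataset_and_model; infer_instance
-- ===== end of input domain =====

-- B scans the underscore positions of the cleaned filename from the right and tests each
-- prefix for dict-key membership, instead of A's scan over every dataset key (alternative).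

-- ===== PORT A =====
-- the loop body: 'if name.startswith(dataset_name + "_"): if len(dataset_name) > matched_length: …'
def edmFoldStep (name : List Char) (acc : Option (List Char) × Int) (k : List Char) :
    Option (List Char) × Int :=
  if PySem.Chars.startswith name (k ++ ['_']) then
    if (k.length : Int) > acc.2 then (some k, (k.length : Int)) else acc
  else acc

def extract_dataset_and_model (filename : String) (datasets : List (String × String)) :
    Option String × Option String :=
  let name := PySem.Chars.replace filename.toList ".csv".toList []
  -- 'for dataset_name in datasets.keys()': the dict's keys are the distinct first components
  let st := (PySem.List.dedup (datasets.map (fun p => p.1.toList))).foldl (edmFoldStep name) (none, 0)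
  match st.1 with
  | some d =>
      -- 'if matched_dataset:' — an empty string is falsy
      if d ≠ [] then
        (some (String.ofList d),
         some (String.ofList (PySem.List.slice name (some ((d.length : Int) + 1)) none)))
      else (none, none)
  | none => (none, none)

-- ===== PORT B =====
-- 'for i in range(len(name)-1, 0, -1): if name[i] == "_" and name[:i] in datasets: return …'
def edmGo (name : List Char) (keys : List String) : Nat → Option String × Option String
  | 0 => (none, none)
  | i + 1 =>
    if name[i+1]? = some '_' ∧ String.ofList (name.take (i+1)) ∈ keys then
      (some (String.ofList (name.take (i+1))), some (String.ofList (name.drop (i+2))))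
    else edmGo name keys i

def extract_dataset_and_model_alt (filename : String) (datasets : List (String × String)) :
    Option String × Option String :=
  let name := PySem.Chars.replace filename.toList ".csv".toList []
  edmGo name (datasets.map Prod.fst) (name.length - 1)

-- ===== PRECONDITION & SPEC =====
def Spec_extract_dataset_and_model (filename : String) (datasets : List (String × String)) (out : Option String × Option String) : Prop := out = extract_dataset_and_model_alt filename datasets
instance (filename : String) (datasets : List (String × String)) (out : Option String × Option String) : Decidable (Spec_extract_dataset_and_model filename datasets out) := by unfold Spec_extract_dataset_and_model; infer_instance

-- ===== CLAIM (what is proved, stated in full; the proofs are below) =====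
def Claim_equal_extract_dataset_and_model : Prop := ∀ (filename : String) (datasets : List (String × String)), Dom_extract_dataset_and_model filename datasets → Spec_extract_dataset_and_model filename datasets (extract_dataset_and_model filename datasets)

-- ===== LEMMAS AND PROOFS =====

-- the running maximum of the lengths of the keys matching 'name.startswith(k + "_")'
def edmMax (name : List Char) (l : List (List Char)) (m : Nat) : Nat :=
  l.foldl (fun a k => if PySem.Chars.startswith name (k ++ ['_']) then max a k.length else a) m

-- a matching key is literally the corresponding prefix of name, with '_' right after it
theorem edm_match_iff (name k : List Char) :
    PySem.Chars.startswith name (k ++ ['_']) = true ↔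
      name[k.length]? = some '_' ∧ name.take k.length = k := by
  rw [PySem.Chars.startswith_iff]
  constructor
  · rintro ⟨t, ht⟩
    subst ht
    simp
  · rintro ⟨h1, h2⟩
    obtain ⟨hlt, hget⟩ := List.getElem?_eq_some_iff.mp h1
    refine ⟨name.drop (k.length + 1), ?_⟩
    rw [List.append_assoc]
    conv_rhs => rw [← List.take_append_drop k.length name]
    rw [h2, List.drop_eq_getElem_cons hlt, hget]
    rfl

-- A's fold state is determined by the running maximum of matching key lengths
theorem edm_fold_eq (name : List Char) (l : List (List Char)) (m : Nat) :
    l.foldl (edmFoldStep name)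
      (if m = 0 then none else some (name.take m), (m : Int)) =
      (if edmMax name l m = 0 then none else some (name.take (edmMax name l m)),
       (edmMax name l m : Int)) := by
  induction l generalizing m with
  | nil => simp [edmMax]
  | cons k t ih =>
    rw [List.foldl_cons]
    have hMcons : edmMax name (k :: t) m =
        edmMax name t (if PySem.Chars.startswith name (k ++ ['_']) then max m k.length else m) := by
      simp [edmMax]
    rw [hMcons]
    by_cases hs : PySem.Chars.startswith name (k ++ ['_']) = true
    · have hk : name.take k.length = k := ((edm_match_iff name k).mp hs).2
      by_cases hgt : (m : Nat) < k.length
      · have : edmFoldStep name (if m = 0 then none else some (name.take m), (m : Int)) k =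
            (if k.length = 0 then none else some (name.take k.length), (k.length : Int)) := by
          simp only [edmFoldStep, hs, if_true]
          rw [if_pos (by exact_mod_cast hgt)]
          rw [if_neg (by omega), hk]
        rw [this, ih]
        have : max m k.length = k.length := by omega
        simp [hs, this]
      · have : edmFoldStep name (if m = 0 then none else some (name.take m), (m : Int)) k =
            (if m = 0 then none else some (name.take m), (m : Int)) := by
          simp only [edmFoldStep, hs, if_true]
          rw [if_neg (by omega)]
        rw [this, ih]
        have : max m k.length = m := by omega
        simp [this]
    · have : edmFoldStep name (if m = 0 then none else some (name.take m), (m : Int)) k =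
          (if m = 0 then none else some (name.take m), (m : Int)) := by
        simp [edmFoldStep, hs]
      rw [this, ih]
      simp [hs]

theorem edm_init_le_max (name : List Char) (l : List (List Char)) (m : Nat) :
    m ≤ edmMax name l m := by
  induction l generalizing m with
  | nil => simp [edmMax]
  | cons a t ih =>
    have h2 : edmMax name (a :: t) m =
        edmMax name t (if PySem.Chars.startswith name (a ++ ['_']) then max m a.length else m) := by
      simp [edmMax]
    rw [h2]
    split
    · exact le_trans (Nat.le_max_left _ _) (ih _)
    · exact ih _

theorem edm_le_max (name : List Char) (l : List (List Char)) (m : Nat) :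
    ∀ k ∈ l, PySem.Chars.startswith name (k ++ ['_']) = true → k.length ≤ edmMax name l m := by
  induction l generalizing m with
  | nil => simp
  | cons a t ih =>
    intro k hk hs
    rcases List.mem_cons.mp hk with h | h
    · subst h
      have h2 : edmMax name (k :: t) m = edmMax name t (max m k.length) := by simp [edmMax, hs]
      rw [h2]
      exact le_trans (Nat.le_max_right m k.length) (edm_init_le_max name t _)
    · have h2 : edmMax name (a :: t) m =
          edmMax name t (if PySem.Chars.startswith name (a ++ ['_']) then max m a.length else m) := by
        simp [edmMax]
      rw [h2]; exact ih _ k h hs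

theorem edm_max_mem (name : List Char) (l : List (List Char)) (m : Nat) :
    edmMax name l m = m ∨ ∃ k ∈ l, PySem.Chars.startswith name (k ++ ['_']) = true ∧
      k.length = edmMax name l m := by
  induction l generalizing m with
  | nil => simp [edmMax]
  | cons a t ih =>
    have h2 : edmMax name (a :: t) m =
        edmMax name t (if PySem.Chars.startswith name (a ++ ['_']) then max m a.length else m) := by
      simp [edmMax]
    rw [h2]
    by_cases hs : PySem.Chars.startswith name (a ++ ['_']) = true
    · rw [if_pos hs]
      rcases ih (max m a.length) with h | ⟨k, hk, hks, hkl⟩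
      · rw [h]
        rcases max_choice m a.length with h' | h'
        · left; exact h'
        · right; exact ⟨a, by simp, hs, h'.symm⟩
      · right; exact ⟨k, by simp [hk], hks, hkl⟩
    · rw [if_neg hs]
      rcases ih m with h | ⟨k, hk, hks, hkl⟩
      · left; exact h
      · right; exact ⟨k, by simp [hk], hks, hkl⟩

-- B's scan returns (none, none) when no admissible underscore position exists
theorem edmGo_none (name : List Char) (keys : List String) (i : Nat)
    (h : ∀ j, 1 ≤ j → j ≤ i →
      ¬ (name[j]? = some '_' ∧ String.ofList (name.take j) ∈ keys)) :
    edmGo name keys i = (none, none) := by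
  induction i with
  | zero => rfl
  | succ n ih =>
    rw [edmGo, if_neg (h (n+1) (by omega) (by omega))]
    exact ih (fun j h1 h2 => h j h1 (by omega))

-- B's scan returns the split at the largest admissible underscore position
theorem edmGo_some (name : List Char) (keys : List String) (i m : Nat)
    (hm1 : 1 ≤ m) (hmi : m ≤ i)
    (hq : name[m]? = some '_' ∧ String.ofList (name.take m) ∈ keys)
    (h : ∀ j, m < j → j ≤ i →
      ¬ (name[j]? = some '_' ∧ String.ofList (name.take j) ∈ keys)) :
    edmGo name keys i =
      (some (String.ofList (name.take m)), some (String.ofList (name.drop (m+1)))) := by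
  induction i with
  | zero => omega
  | succ n ih =>
    by_cases hm : m = n + 1
    · subst hm
      rw [edmGo, if_pos hq]
    · rw [edmGo, if_neg (h (n+1) (by omega) (by omega))]
      exact ih (by omega) (fun j h1 h2 => h j h1 (by omega))

-- key membership: as a cleaned char list among the dict's keys ↔ as a string among the firsts
theorem edm_mem_keys (datasets : List (String × String)) (kc : List Char) :
    kc ∈ PySem.List.dedup (datasets.map (fun p => p.1.toList)) ↔
      String.ofList kc ∈ datasets.map Prod.fst := by
  rw [PySem.List.mem_dedup]
  simp only [List.mem_map]
  constructor
  · rintro ⟨p, hp, rfl⟩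
    exact ⟨p, hp, by simp⟩
  · rintro ⟨p, hp, hpk⟩
    refine ⟨p, hp, ?_⟩
    rw [hpk]
    simp

-- ===== VERDICT (by name: the statement is the Claim_ definition above) =====
theorem extract_dataset_and_model_spec : Claim_equal_extract_dataset_and_model := by
  intro filename datasets _
  unfold Spec_extract_dataset_and_model
  set name := PySem.Chars.replace filename.toList ".csv".toList [] with hname
  set keysC := PySem.List.dedup (datasets.map (fun p => p.1.toList)) with hkC
  set keys := datasets.map Prod.fst with hk
  set M := edmMax name keysC 0 with hM
  have hA0 : extract_dataset_and_model filename datasets =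
      (match (keysC.foldl (edmFoldStep name) (none, 0)).1 with
       | some d =>
           if d ≠ [] then
             (some (String.ofList d),
              some (String.ofList (PySem.List.slice name (some ((d.length : Int) + 1)) none)))
           else (none, none)
       | none => (none, none)) := rfl
  have hB0 : extract_dataset_and_model_alt filename datasets =
      edmGo name keys (name.length - 1) := rfl
  have hfold : keysC.foldl (edmFoldStep name) (none, 0) =
      (if M = 0 then none else some (name.take M), (M : Int)) := by
    simpa using edm_fold_eq name keysC 0
  have hQle : ∀ j : Nat, (name[j]? = some '_' ∧ String.ofList (name.take j) ∈ keys) → j ≤ M := by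
    rintro j ⟨h1, h2⟩
    have hjlt : j < name.length := (List.getElem?_eq_some_iff.mp h1).1
    have hlen : (name.take j).length = j := by simp [List.length_take]; omega
    have hs : PySem.Chars.startswith name ((name.take j) ++ ['_']) = true := by
      rw [edm_match_iff, hlen]
      exact ⟨h1, rfl⟩
    have hmem : (name.take j) ∈ keysC := (edm_mem_keys datasets _).mpr h2
    have := edm_le_max name keysC 0 _ hmem hs
    rwa [hlen] at this
  by_cases hM0 : M = 0
  · have hB : edmGo name keys (name.length - 1) = (none, none) := by
      apply edmGo_none
      intro j hj1 hji hq
      have := hQle j hq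
      omega
    rw [hA0, hB0, hfold, hB, if_pos hM0]
  · obtain ⟨k, hkmem, hks, hkl⟩ := (edm_max_mem name keysC 0).resolve_left hM0
    rw [← hM] at hkl
    obtain ⟨h1, h2⟩ := (edm_match_iff name k).mp hks
    rw [hkl] at h1
    have htake : name.take M = k := by rw [← hkl]; exact h2
    have hMlt : M < name.length := (List.getElem?_eq_some_iff.mp h1).1
    have hQM : name[M]? = some '_' ∧ String.ofList (name.take M) ∈ keys :=
      ⟨h1, by rw [htake]; exact (edm_mem_keys datasets k).mp hkmem⟩
    have hB := edmGo_some name keys (name.length - 1) M (by omega) (by omega) hQM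
      (fun j hj1 hj2 hq => absurd (hQle j hq) (by omega))
    have hlenM : (name.take M).length = M := by simp [List.length_take]; omega
    have hdne : name.take M ≠ [] := by
      intro h
      rw [h] at hlenM
      simp at hlenM
      omega
    have hslice : PySem.List.slice name (some (((name.take M).length : Int) + 1)) none =
        name.drop (M + 1) := by
      rw [hlenM]
      have hcast : ((M : Int) + 1) = (((M + 1 : Nat)) : Int) := by push_cast; ring
      rw [hcast, PySem.List.slice_from_natCast]
    rw [hA0, hB0, hfold, hB, if_neg hM0]
    simp only [ne_eq, hdne, not_false_eq_true, if_true]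
    rw [hslice]
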